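-- pv_equiv track=rewrite | github.com/TAndronicus/classifier-integration-analysis | FileHelper.py | get_full_filename
-- ===== SOURCE A (Python) =====
-- FILENAMES = ['biodeg.scsv',
--              'bupa.dat',
--              'cryotherapy.xlsx',
--              'data_banknote_authentication.csv',
--              'haberman.dat',
--              'ionosphere.dat',
--              'meter_a.tsv',
--              'pop_failures.tsv',
--              'seismic_bumps.dat',
--              'twonorm.dat',
--              'wdbc.dat',
--              'wisconsin.dat']
--
-- def get_full_filename(filename_raw: str):
--     """Returns whole filename basen on the first part
--
--     :param filename_raw: str
--     :return: str
--     """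
--     was_found = False
--     for FILENAME in FILENAMES:
--         if FILENAME.startswith(filename_raw):
--             if was_found:
--                 raise FileNotFoundError('Name of file wrong or ambiguous')
--             else:
--                 filename = FILENAME
--                 was_found = True
--     if was_found:
--         return filename
--     else:
--         raise FileNotFoundError('Name of file not found')
-- ===== SOURCE B (Python) =====
-- FILENAMES = ['biodeg.scsv',
--              'bupa.dat',
--              'cryotherapy.xlsx',
--              'data_banknote_authentication.csv',
--              'haberman.dat',
--              'ionosphere.dat',
--              'meter_a.tsv',
--              'pop_failures.tsv',
--              'seismic_bumps.dat',
--              'twonorm.dat',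
--              'wdbc.dat',
--              'wisconsin.dat']
--
--
-- def get_full_filename(filename_raw: str):
--     matches = [f for f in FILENAMES if f.startswith(filename_raw)]
--     if len(matches) == 0:
--         raise FileNotFoundError('Name of file not found')
--     elif len(matches) == 1:
--         return matches[0]
--     else:
--         raise FileNotFoundError('Name of file wrong or ambiguous')
-- ===== Notes on version B (the rewrite author's own statement) =====
-- stated objective: simpler
-- what changed: Replaces the flag-tracking single pass with inline early-raise by a collect-then-dispatch: build the list of prefix matches once, then branch only on its count.
import Mathlib
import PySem

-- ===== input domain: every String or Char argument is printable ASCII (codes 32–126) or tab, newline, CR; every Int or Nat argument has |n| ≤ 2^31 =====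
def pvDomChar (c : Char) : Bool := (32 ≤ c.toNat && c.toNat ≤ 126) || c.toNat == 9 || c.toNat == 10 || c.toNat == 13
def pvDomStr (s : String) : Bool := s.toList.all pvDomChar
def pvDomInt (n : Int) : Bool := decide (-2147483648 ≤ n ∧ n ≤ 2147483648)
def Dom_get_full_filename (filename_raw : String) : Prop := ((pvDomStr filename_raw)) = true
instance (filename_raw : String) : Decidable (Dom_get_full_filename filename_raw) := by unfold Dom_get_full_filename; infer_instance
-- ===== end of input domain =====

-- B replaces A's flag-tracking single pass (early raise on a second match) by collecting all
-- prefix ms once and dispatching on their count; same exceptions, simpler control flow.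

-- ===== PORT A =====
-- module-level constant FILENAMES
def pyFILENAMES : List String :=
  ["biodeg.scsv", "bupa.dat", "cryotherapy.xlsx", "data_banknote_authentication.csv",
   "haberman.dat", "ionosphere.dat", "meter_a.tsv", "pop_failures.tsv",
   "seismic_bumps.dat", "twonorm.dat", "wdbc.dat", "wisconsin.dat"]

-- A's loop carries (was_found, filename); the two 'raise FileNotFoundError' paths are
-- unreachable under Pre_ and return "" / keep the state here.
def get_full_filename (filename_raw : String) : String :=
  let st := pyFILENAMES.foldl
    (fun (st : Bool × String) FILENAME =>
      if PySem.Str.startswith FILENAME filename_raw then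
        if st.1 then st          -- raise FileNotFoundError('Name of file wrong or ambiguous'); excluded by Pre_
        else (true, FILENAME)
      else st)
    (false, "")
  if st.1 then st.2
  else ""                        -- raise FileNotFoundError('Name of file not found'); excluded by Pre_

-- ===== PORT B =====
def get_full_filename_alt (filename_raw : String) : String :=
  let ms := pyFILENAMES.filter (fun f => PySem.Str.startswith f filename_raw)
  if ms.length = 0 then ""                  -- raise FileNotFoundError('Name of file not found'); excluded by Pre_
  else if ms.length = 1 then ms.headD ""
  else ""                                        -- raise FileNotFoundError('Name of file wrong or ambiguous'); excluded by Pre_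

-- ===== PRECONDITION & SPEC =====
-- A raises FileNotFoundError when zero or at least two filenames start with filename_raw;
-- Pre_ admits exactly the inputs with exactly one prefix match.
def Pre_get_full_filename (filename_raw : String) : Prop :=
  pyFILENAMES.countP (fun f => PySem.Str.startswith f filename_raw) = 1

instance (filename_raw : String) : Decidable (Pre_get_full_filename filename_raw) := by
  unfold Pre_get_full_filename; infer_instance

def pvWitness_get_full_filename : String := "bupa"

def Spec_get_full_filename (filename_raw : String) (out : String) : Prop := out = get_full_filename_alt filename_raw
instance (filename_raw : String) (out : String) : Decidable (Spec_get_full_filename filename_raw out) := by unfold Spec_get_full_filename; infer_instance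

-- ===== CLAIM (what is proved, stated in full; the proofs are below) =====
def Claim_equal_get_full_filename : Prop := ∀ (filename_raw : String), Dom_get_full_filename filename_raw → Pre_get_full_filename filename_raw → Spec_get_full_filename filename_raw (get_full_filename filename_raw)

-- ===== LEMMAS AND PROOFS =====

-- A's loop step leaves the state untouched on a list with no match
theorem foldA_nomatch (p : String → Bool) (L : List String) (st : Bool × String)
    (h : L.filter p = []) :
    L.foldl (fun (st : Bool × String) f =>
      if p f then (if st.1 then st else (true, f)) else st) st = st := by
  induction L generalizing st with
  | nil => rfl
  | cons a L ih =>
    by_cases hp : p a = true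
    · simp [List.filter, hp] at h
    · simp only [List.filter, hp] at h
      simp [List.foldl, hp]
      exact ih _ (by simpa [hp] using h)

-- with exactly one match m, A's loop ends in (true, m)
theorem foldA_one (p : String → Bool) (L : List String) (m : String)
    (h : L.filter p = [m]) :
    L.foldl (fun (st : Bool × String) f =>
      if p f then (if st.1 then st else (true, f)) else st) (false, "") = (true, m) := by
  induction L with
  | nil => simp at h
  | cons a L ih =>
    by_cases hp : p a = true
    · have h' : a = m ∧ L.filter p = [] := by
        simpa [List.filter, hp] using h
      obtain ⟨rfl, hf⟩ := h'
      simp only [List.foldl, hp, if_true, Bool.false_eq_true, reduceIte]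
      exact foldA_nomatch p L (true, a) hf
    · simp only [List.foldl, hp, Bool.false_eq_true, reduceIte]
      exact ih (by simpa [List.filter, hp] using h)

-- ===== VERDICT (by name: the statement is the Claim_ definition above) =====
theorem get_full_filename_spec : Claim_equal_get_full_filename := by
  intro s _ hpre
  unfold Pre_get_full_filename at hpre
  rw [List.countP_eq_length_filter, List.length_eq_one_iff] at hpre
  obtain ⟨m, hm⟩ := hpre
  unfold Spec_get_full_filename get_full_filename get_full_filename_alt
  rw [foldA_one _ _ _ hm, hm]
  rfl
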